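-- pv_equiv track=rewrite | github.com/tmuntianu/symbends | bends.py | add_midpoints
-- ===== SOURCE A (Python) =====
-- def add_midpoints(walk):
--     walk_x = []
--     walk_y = []
--     for i in range(len(walk[0])):
--         x = walk[0][i]
--         y = walk[1][i]
--         if i != 0:
--             walk_x.append((x+walk[0][i-1])//2)
--             walk_y.append((y+walk[1][i-1])//2)
--         walk_x.append(x)
--         walk_y.append(y)
--     return (walk_x, walk_y)
-- ===== SOURCE B (Python) =====
-- def add_midpoints(walk):
--     xs, ys = walk[0], walk[1]
--     n = len(xs)
--     walk_x = [xs[j // 2] if j % 2 == 0 else (xs[j // 2] + xs[j // 2 + 1]) // 2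
--               for j in range(2 * n - 1)]
--     walk_y = [ys[j // 2] if j % 2 == 0 else (ys[j // 2] + ys[j // 2 + 1]) // 2
--               for j in range(2 * n - 1)]
--     return (walk_x, walk_y)
-- ===== Notes on version B (the rewrite author's own statement) =====
-- stated objective: alternative
-- what changed: Builds each output list positionally by a closed-form index formula (element j is the point xs[j//2] when j is even, the floor midpoint of xs[j//2] and xs[j//2+1] when j is odd, over range(2*n-1)) instead of A's sequential append loop with a look-back at index i-1.
import Mathlib
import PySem

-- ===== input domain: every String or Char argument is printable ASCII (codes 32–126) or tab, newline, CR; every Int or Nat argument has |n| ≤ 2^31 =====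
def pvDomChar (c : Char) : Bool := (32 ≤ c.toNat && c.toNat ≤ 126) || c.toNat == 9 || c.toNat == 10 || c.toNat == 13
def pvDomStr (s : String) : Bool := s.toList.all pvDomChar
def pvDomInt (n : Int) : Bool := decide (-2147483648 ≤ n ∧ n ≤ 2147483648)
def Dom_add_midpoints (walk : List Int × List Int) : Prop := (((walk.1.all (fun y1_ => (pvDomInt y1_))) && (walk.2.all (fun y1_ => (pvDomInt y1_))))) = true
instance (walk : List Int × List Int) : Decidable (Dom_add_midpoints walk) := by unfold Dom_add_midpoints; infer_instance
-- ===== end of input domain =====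

-- B builds each output list positionally by a closed-form index-parity formula over
-- range(2*n-1) instead of A's sequential append loop with a look-back (objective: alternative).

-- ===== PORT A =====
def add_midpoints (walk : List Int × List Int) : List Int × List Int :=
  (PySem.List.pyRange 0 (walk.1.length : Int) 1).foldl
    (fun acc i =>
      let x := PySem.List.pyGetD walk.1 i 0
      let y := PySem.List.pyGetD walk.2 i 0
      let acc := if i ≠ 0 then
          (acc.1 ++ [PySem.Int.floordiv (x + PySem.List.pyGetD walk.1 (i - 1) 0) 2],
           acc.2 ++ [PySem.Int.floordiv (y + PySem.List.pyGetD walk.2 (i - 1) 0) 2])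
        else acc
      (acc.1 ++ [x], acc.2 ++ [y]))
    ([], [])

-- ===== PORT B =====
-- the comprehension body of Source B: output element at position j, read off the source list L
def pvIdxF (L : List Int) (j : Int) : Int :=
  if PySem.Int.mod j 2 = 0 then PySem.List.pyGetD L (PySem.Int.floordiv j 2) 0
  else PySem.Int.floordiv
         (PySem.List.pyGetD L (PySem.Int.floordiv j 2) 0 +
          PySem.List.pyGetD L (PySem.Int.floordiv j 2 + 1) 0) 2

def add_midpoints_alt (walk : List Int × List Int) : List Int × List Int :=
  let xs := walk.1
  let ys := walk.2
  let n : Int := xs.length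
  ((PySem.List.pyRange 0 (2 * n - 1) 1).map (pvIdxF xs),
   (PySem.List.pyRange 0 (2 * n - 1) 1).map (pvIdxF ys))

-- ===== PRECONDITION & SPEC =====
-- Pre_ excludes inputs where the y-list is shorter than the x-list: there A raises IndexError.
def Pre_add_midpoints (walk : List Int × List Int) : Prop := walk.1.length ≤ walk.2.length
instance (walk : List Int × List Int) : Decidable (Pre_add_midpoints walk) := by unfold Pre_add_midpoints; infer_instance
def pvWitness_add_midpoints : (List Int × List Int) := ([1, 4, 9], [2, 5, 11])

def Spec_add_midpoints (walk : List Int × List Int) (out : List Int × List Int) : Prop := out = add_midpoints_alt walk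
instance (walk : List Int × List Int) (out : List Int × List Int) : Decidable (Spec_add_midpoints walk out) := by unfold Spec_add_midpoints; infer_instance

-- ===== CLAIM (what is proved, stated in full; the proofs are below) =====
def Claim_equal_add_midpoints : Prop := ∀ (walk : List Int × List Int), Dom_add_midpoints walk → Pre_add_midpoints walk → Spec_add_midpoints walk (add_midpoints walk)

-- ===== LEMMAS AND PROOFS =====

-- reference interleaving: midpoint with the previous point, then the point, down the list
def pvF (prev : Int) (l : List Int) : List Int :=
  match l with
  | [] => []
  | a :: t => PySem.Int.floordiv (prev + a) 2 :: a :: pvF a t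

-- reference lockstep recursion matching A's loop body from index 1 on
def pvGo (xp yp : Int) (xs ys accx accy : List Int) : List Int × List Int :=
  match xs, ys with
  | x :: xs', y :: ys' =>
      pvGo x y xs' ys'
        (accx ++ [PySem.Int.floordiv (xp + x) 2, x])
        (accy ++ [PySem.Int.floordiv (yp + y) 2, y])
  | _, _ => (accx, accy)

theorem pvGo_eq (xs : List Int) : ∀ (ys : List Int) (xp yp : Int) (accx accy : List Int),
    xs.length ≤ ys.length →
    pvGo xp yp xs ys accx accy = (accx ++ pvF xp xs, accy ++ pvF yp (ys.take xs.length)) := by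
  induction xs with
  | nil => intro ys xp yp accx accy _; simp [pvGo, pvF]
  | cons x xs ih =>
    intro ys xp yp accx accy h
    cases ys with
    | nil => simp at h
    | cons y ys =>
      simp only [pvGo]
      rw [ih ys x y _ _ (by simpa using h)]
      simp [pvF]

-- A's loop from index j ≥ 1 equals pvGo on the dropped suffixes
theorem pvA_loop (X Y : List Int) (hm : X.length ≤ Y.length) :
    ∀ (k : Nat) (j : Nat), j = X.length - k → 1 ≤ j → ∀ (accx accy : List Int),
    (PySem.List.pyRange (j : Int) (X.length : Int) 1).foldl
      (fun acc i =>
        let x := PySem.List.pyGetD X i 0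
        let y := PySem.List.pyGetD Y i 0
        let acc := if i ≠ 0 then
            (acc.1 ++ [PySem.Int.floordiv (x + PySem.List.pyGetD X (i - 1) 0) 2],
             acc.2 ++ [PySem.Int.floordiv (y + PySem.List.pyGetD Y (i - 1) 0) 2])
          else acc
        (acc.1 ++ [x], acc.2 ++ [y]))
      (accx, accy)
    = pvGo (X.getD (j - 1) 0) (Y.getD (j - 1) 0) (X.drop j) (Y.drop j) accx accy := by
  intro k
  induction k with
  | zero =>
    intro j hj h1 accx accy
    have hjn : j = X.length := by omega
    rw [PySem.List.pyRange_one_eq_nil (by omega)]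
    have hx : X.drop j = [] := by simp [hjn]
    have hy' : Y.length ≤ j ∨ ¬ Y.length ≤ j := em _
    rcases hy' with hy' | hy'
    · have : Y.drop j = [] := List.drop_eq_nil_of_le hy'
      simp [hx, this, pvGo]
    · cases hYd : Y.drop j with
      | nil => simp [hx, pvGo]
      | cons a l => simp [hx, pvGo]
  | succ k ih =>
    intro j hj h1 accx accy
    by_cases hlt : j < X.length
    · have hcons := PySem.List.pyRange_one_cons (a := (j : Int)) (b := (X.length : Int)) (by exact_mod_cast hlt)
      rw [hcons, List.foldl_cons]
      have hjy : j < Y.length := lt_of_lt_of_le hlt hm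
      have hne : (j : Int) ≠ 0 := by exact_mod_cast (by omega : j ≠ 0)
      have hX : PySem.List.pyGetD X (j : Int) 0 = X.getD j 0 := PySem.List.pyGetD_natCast X j 0
      have hY : PySem.List.pyGetD Y (j : Int) 0 = Y.getD j 0 := PySem.List.pyGetD_natCast Y j 0
      have hj1 : ((j : Int) - 1) = ((j - 1 : Nat) : Int) := by omega
      have hX1 : PySem.List.pyGetD X ((j : Int) - 1) 0 = X.getD (j - 1) 0 := by
        rw [hj1]; exact PySem.List.pyGetD_natCast X (j - 1) 0
      have hY1 : PySem.List.pyGetD Y ((j : Int) - 1) 0 = Y.getD (j - 1) 0 := by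
        rw [hj1]; exact PySem.List.pyGetD_natCast Y (j - 1) 0
      have hih := ih (j + 1) (by omega) (by omega)
        (accx ++ [PySem.Int.floordiv (X.getD j 0 + X.getD (j - 1) 0) 2, X.getD j 0])
        (accy ++ [PySem.Int.floordiv (Y.getD j 0 + Y.getD (j - 1) 0) 2, Y.getD j 0])
      simp only [ne_eq] at hih
      simp only [hne, hX, hY, hX1, hY1, ne_eq, not_false_eq_true, if_true,
        List.append_assoc, List.cons_append, List.nil_append]
      rw [show ((j : Int) + 1) = ((j + 1 : Nat) : Int) by push_cast; ring, hih]
      have hXd : X.drop j = X.getD j 0 :: X.drop (j + 1) := by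
        rw [List.getD_eq_getElem _ _ hlt]
        exact List.drop_eq_getElem_cons hlt
      have hYd : Y.drop j = Y.getD j 0 :: Y.drop (j + 1) := by
        rw [List.getD_eq_getElem _ _ hjy]
        exact List.drop_eq_getElem_cons hjy
      rw [hXd, hYd]
      simp [pvGo, Int.add_comm]
    · rw [PySem.List.pyRange_one_eq_nil (by exact_mod_cast (by omega : X.length ≤ j))]
      have hx : X.drop j = [] := List.drop_eq_nil_of_le (by omega)
      cases hYd : Y.drop j with
      | nil => simp [hx, pvGo]
      | cons a l => simp [hx, pvGo]

-- B's comprehension from output position 2k+1 on equals pvF on the corresponding segment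
theorem pvMapMid (L : List Int) (n : Nat) (hn : n ≤ L.length) :
    ∀ (d k : Nat), k + d = n → k < n →
    (PySem.List.pyRange (2 * (k : Int) + 1) (2 * (n : Int) - 1) 1).map (pvIdxF L)
      = pvF (L.getD k 0) ((L.take n).drop (k + 1)) := by
  intro d
  induction d with
  | zero => intro k h hk; omega
  | succ d ih =>
    intro k h hk
    by_cases hk1 : k + 1 < n
    · have hc1 : (2 * (k : Int) + 1) < 2 * (n : Int) - 1 := by omega
      rw [PySem.List.pyRange_one_cons hc1, List.map_cons]
      have hc2 : (2 * (k : Int) + 1 + 1) < 2 * (n : Int) - 1 := by omega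
      rw [PySem.List.pyRange_one_cons hc2, List.map_cons]
      have e1 : pvIdxF L (2 * (k : Int) + 1)
          = PySem.Int.floordiv (L.getD k 0 + L.getD (k + 1) 0) 2 := by
        have hm : PySem.Int.mod (2 * (k : Int) + 1) 2 ≠ 0 := by
          rw [PySem.Int.mod_eq_emod_of_pos (by norm_num)]; omega
        have hd : PySem.Int.floordiv (2 * (k : Int) + 1) 2 = (k : Int) := by
          rw [PySem.Int.floordiv_eq_ediv_of_pos (by norm_num)]; omega
        simp only [pvIdxF, hm, if_false, hd]
        rw [show ((k : Int) + 1) = ((k + 1 : Nat) : Int) by push_cast; ring]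
        rw [PySem.List.pyGetD_natCast, PySem.List.pyGetD_natCast]
      have e2 : pvIdxF L (2 * (k : Int) + 1 + 1) = L.getD (k + 1) 0 := by
        have hm : PySem.Int.mod (2 * (k : Int) + 1 + 1) 2 = 0 := by
          rw [PySem.Int.mod_eq_emod_of_pos (by norm_num)]; omega
        have hd : PySem.Int.floordiv (2 * (k : Int) + 1 + 1) 2 = ((k + 1 : Nat) : Int) := by
          rw [PySem.Int.floordiv_eq_ediv_of_pos (by norm_num)]; push_cast; omega
        simp only [pvIdxF, hm, if_true, hd, PySem.List.pyGetD_natCast]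
      have hrest : (2 * (k : Int) + 1 + 1 + 1) = 2 * ((k + 1 : Nat) : Int) + 1 := by push_cast; ring
      rw [e1, e2, hrest, ih (k + 1) (by omega) hk1]
      have hkl : k + 1 < (L.take n).length := by simp [Nat.min_eq_left hn]; omega
      have hdrop : (L.take n).drop (k + 1) = L.getD (k + 1) 0 :: (L.take n).drop (k + 2) := by
        rw [List.drop_eq_getElem_cons hkl]
        congr 1
        rw [List.getElem_take, List.getD_eq_getElem _ _ (by omega)]
      rw [hdrop]
      simp [pvF]
    · have hkn : k + 1 = n := by omega
      rw [PySem.List.pyRange_one_eq_nil (by omega)]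
      have : (L.take n).drop (k + 1) = [] := by
        apply List.drop_eq_nil_of_le; simp [Nat.min_eq_left hn]; omega
      simp [this, pvF]

-- ===== VERDICT (by name: the statement is the Claim_ definition above) =====
theorem add_midpoints_spec : Claim_equal_add_midpoints := by
  intro walk _ hpre
  unfold Spec_add_midpoints add_midpoints add_midpoints_alt
  obtain ⟨X, Y⟩ := walk
  unfold Pre_add_midpoints at hpre
  simp only at hpre
  cases X with
  | nil =>
    simp only [List.length_nil]
    rw [PySem.List.pyRange_one_eq_nil (by norm_num), PySem.List.pyRange_one_eq_nil (by norm_num)]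
    simp
  | cons x0 X' =>
    cases Y with
    | nil => simp at hpre
    | cons y0 Y' =>
      -- A side
      have h0 : (0 : Int) < ((x0 :: X').length : Int) := by simp
      rw [PySem.List.pyRange_one_cons h0, List.foldl_cons]
      have hA := pvA_loop (x0 :: X') (y0 :: Y') hpre ((x0 :: X').length - 1) 1 (by omega) (by omega)
        [PySem.List.pyGetD (x0 :: X') 0 0] [PySem.List.pyGetD (y0 :: Y') 0 0]
      simp only [ne_eq] at hA
      simp only [ne_eq, not_true_eq_false, if_false, List.nil_append]
      rw [show ((0 : Int) + 1) = ((1 : Nat) : Int) by norm_num, hA]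
      have hlen : X'.length ≤ Y'.length := by simpa using hpre
      rw [pvGo_eq _ _ _ _ _ _ (by simpa using hlen)]
      -- B side
      have hn : 0 < (x0 :: X').length := by simp
      have hb0 : (0 : Int) < 2 * ((x0 :: X').length : Int) - 1 := by
        have : (1 : Int) ≤ ((x0 :: X').length : Int) := by exact_mod_cast hn
        omega
      rw [PySem.List.pyRange_one_cons hb0]
      simp only [List.map_cons]
      have e0 : pvIdxF (x0 :: X') 0 = x0 := by
        simp [pvIdxF, PySem.Int.mod, PySem.Int.floordiv, PySem.List.pyGetD]
      have e0y : pvIdxF (y0 :: Y') 0 = y0 := by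
        simp [pvIdxF, PySem.Int.mod, PySem.Int.floordiv, PySem.List.pyGetD]
      rw [e0, e0y]
      have hshift : ((0 : Int) + 1) = 2 * ((0 : Nat) : Int) + 1 := by norm_num
      rw [hshift]
      rw [pvMapMid (x0 :: X') (x0 :: X').length (le_refl _) (x0 :: X').length 0 (by omega) hn]
      rw [pvMapMid (y0 :: Y') (x0 :: X').length hpre (x0 :: X').length 0 (by omega) hn]
      simp only [List.take_length, List.getD_cons_zero, List.drop_one, List.tail_cons]
      simp [PySem.List.pyGetD, List.take_succ_cons]
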